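-- pv_equiv track=rewrite | github.com/JakeKitchen/pennylane | pennylane/fermi/conversion.py | _update_set
-- ===== SOURCE A (Python) =====
-- def _update_set(j, bin_range, n):
--     """
--     Computes the update set of the j-th orbital in n qubits.
--
--     Args:
--         j (int): the orbital index
--         bin_range (int): smallest power of 2 equal to or greater than n
--         n (int): number of qubits
--
--     Returns:
--         list: List containing the update set
--     """
--     indices = []
--     midpoint = bin_range // 2
--     if bin_range % 2 != 0:
--         return indices
--
--     if j < midpoint:
--         indices.append(bin_range - 1)
--         indices.extend(_update_set(j, midpoint, n))
--     else:
--         indices.extend(u + midpoint for u in _update_set(j - midpoint, midpoint, n))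
--
--     return [u for u in indices if u < n]
-- ===== SOURCE B (Python) =====
-- def _update_set(j, bin_range, n):
--     """Iterative re-implementation: walks the halving structure top-down with an
--     accumulated offset instead of recursing; single final < n filter."""
--     indices = []
--     off = 0
--     r = bin_range
--     while r != 0 and r % 2 == 0:
--         m = r // 2
--         if j < m:
--             indices.append(off + r - 1)
--         else:
--             j -= m
--             off += m
--         r = m
--     return [u for u in indices if u < n]
-- ===== Notes on version B (the rewrite author's own statement) =====
-- stated objective: simpler
-- what changed: Replaced the recursion (which rebuilds and re-filters the index list at every level and shifts sublists by the midpoint on each right branch) by a single top-down loop over the halving structure that carries an accumulated offset and filters once at the end.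
import Mathlib
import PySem

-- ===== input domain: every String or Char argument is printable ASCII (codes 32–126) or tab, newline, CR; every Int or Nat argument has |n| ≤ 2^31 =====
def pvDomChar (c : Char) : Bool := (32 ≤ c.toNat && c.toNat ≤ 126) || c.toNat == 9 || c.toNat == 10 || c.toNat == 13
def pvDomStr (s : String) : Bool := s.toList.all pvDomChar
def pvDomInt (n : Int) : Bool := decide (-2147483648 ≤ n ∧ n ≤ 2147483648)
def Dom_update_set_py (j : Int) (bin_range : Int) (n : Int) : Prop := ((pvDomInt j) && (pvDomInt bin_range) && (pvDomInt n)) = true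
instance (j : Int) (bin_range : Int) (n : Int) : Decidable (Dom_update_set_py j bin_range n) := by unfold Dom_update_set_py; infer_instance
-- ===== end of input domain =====

-- B replaces A's recursion (per-level re-filtering and midpoint shifts) by one top-down
-- loop with an accumulated offset and a single final filter; objective: simpler.


-- termination measure lemma used by the ports' recursions
theorem pvHalveLt (r : Int) (h0 : r ≠ 0) (h2 : PySem.Int.mod r 2 = 0) :
    (PySem.Int.floordiv r 2).natAbs < r.natAbs := by
  have h := PySem.Int.floordiv_mul_add_mod r 2
  rw [h2] at h
  omega

-- ===== PORT A =====
-- literal port of A's recursion; the `bin_range = 0` guard only makes the same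
-- computation total (Python recurses forever there; excluded by Pre_)
def update_set_py (j : Int) (bin_range : Int) (n : Int) : List Int :=
  if h0 : bin_range = 0 then []
  else
    if h2 : PySem.Int.mod bin_range 2 ≠ 0 then []
    else
      let midpoint := PySem.Int.floordiv bin_range 2
      let indices :=
        if j < midpoint then
          (bin_range - 1) :: update_set_py j midpoint n
        else
          (update_set_py (j - midpoint) midpoint n).map (fun u => u + midpoint)
      indices.filter (fun u => u < n)
termination_by bin_range.natAbs
decreasing_by all_goals exact pvHalveLt bin_range h0 (not_not.mp h2)

-- ===== PORT B =====
-- the while-loop of Source B, as a tail-recursive helper over the same state (j, off, r, indices)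
def pvAltLoop (jj : Int) (off : Int) (r : Int) (acc : List Int) : List Int :=
  if h : r ≠ 0 ∧ PySem.Int.mod r 2 = 0 then
    let m := PySem.Int.floordiv r 2
    if jj < m then pvAltLoop jj off m (acc ++ [off + r - 1])
    else pvAltLoop (jj - m) (off + m) m acc
  else acc
termination_by r.natAbs
decreasing_by all_goals exact pvHalveLt r h.1 h.2

def update_set_py_alt (j : Int) (bin_range : Int) (n : Int) : List Int :=
  (pvAltLoop j 0 bin_range []).filter (fun u => u < n)

-- ===== PRECONDITION & SPEC =====
-- Pre_ excludes only bin_range = 0, where Python A recurses forever (RecursionError).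
def Pre_update_set_py (j : Int) (bin_range : Int) (n : Int) : Prop := bin_range ≠ 0
instance (j : Int) (bin_range : Int) (n : Int) : Decidable (Pre_update_set_py j bin_range n) := by unfold Pre_update_set_py; infer_instance
def pvWitness_update_set_py : Int × Int × Int := (1, 8, 6)

def Spec_update_set_py (j : Int) (bin_range : Int) (n : Int) (out : List Int) : Prop := out = update_set_py_alt j bin_range n
instance (j : Int) (bin_range : Int) (n : Int) (out : List Int) : Decidable (Spec_update_set_py j bin_range n out) := by unfold Spec_update_set_py; infer_instance

-- ===== CLAIM (what is proved, stated in full; the proofs are below) =====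
def Claim_equal_update_set_py : Prop := ∀ (j : Int) (bin_range : Int) (n : Int), Dom_update_set_py j bin_range n → Pre_update_set_py j bin_range n → Spec_update_set_py j bin_range n (update_set_py j bin_range n)

-- ===== LEMMAS AND PROOFS =====

-- the raw (unfiltered) index list of the halving structure
def pvURaw (jj : Int) (r : Int) : List Int :=
  if h0 : r = 0 then []
  else
    if h2 : PySem.Int.mod r 2 ≠ 0 then []
    else
      if jj < PySem.Int.floordiv r 2 then (r - 1) :: pvURaw jj (PySem.Int.floordiv r 2)
      else (pvURaw (jj - PySem.Int.floordiv r 2) (PySem.Int.floordiv r 2)).map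
        (fun u => u + PySem.Int.floordiv r 2)
termination_by r.natAbs
decreasing_by all_goals exact pvHalveLt r h0 (not_not.mp h2)

theorem pvURaw_empty_of_neg (r : Int) (x : Int) (hr : r < 0) (hx : 0 ≤ x) :
    pvURaw x r = [] := by
  rw [pvURaw, dif_neg (by omega : ¬ r = 0)]
  by_cases h2 : PySem.Int.mod r 2 ≠ 0
  · rw [dif_pos h2]
  · rw [dif_neg h2]
    have hmm := PySem.Int.floordiv_mul_add_mod r 2
    rw [not_not.mp h2] at hmm
    have hmneg : PySem.Int.floordiv r 2 < 0 := by omega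
    rw [if_neg (by omega : ¬ x < PySem.Int.floordiv r 2)]
    rw [pvURaw_empty_of_neg (PySem.Int.floordiv r 2) (x - PySem.Int.floordiv r 2)
        hmneg (by omega)]
    rfl
termination_by r.natAbs
decreasing_by exact pvHalveLt r (by omega) (not_not.mp h2)

theorem pvAltLoop_eq (r : Int) (jj off : Int) (acc : List Int) :
    pvAltLoop jj off r acc = acc ++ (pvURaw jj r).map (fun u => u + off) := by
  rw [pvAltLoop, pvURaw]
  by_cases h0 : r = 0
  · rw [dif_pos h0, dif_neg (by simp [h0])]
    simp
  · rw [dif_neg h0]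
    by_cases h2 : PySem.Int.mod r 2 ≠ 0
    · rw [dif_pos h2, dif_neg (by exact fun h => h2 h.2)]
      simp
    · have hm2 := not_not.mp h2
      rw [dif_neg h2, dif_pos (⟨h0, hm2⟩ : r ≠ 0 ∧ PySem.Int.mod r 2 = 0)]
      by_cases hj : jj < PySem.Int.floordiv r 2
      · rw [if_pos hj, if_pos hj]
        rw [pvAltLoop_eq (PySem.Int.floordiv r 2) jj off]
        rw [List.map_cons, List.append_assoc, List.singleton_append]
        have : off + r - 1 = r - 1 + off := by ring
        rw [this]
      · rw [if_neg hj, if_neg hj]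
        rw [pvAltLoop_eq (PySem.Int.floordiv r 2) (jj - PySem.Int.floordiv r 2)
            (off + PySem.Int.floordiv r 2)]
        rw [List.map_map]
        refine congrArg (acc ++ ·) (List.map_congr_left ?_)
        intro u _
        show u + (off + PySem.Int.floordiv r 2) = u + PySem.Int.floordiv r 2 + off
        ring
termination_by r.natAbs
decreasing_by all_goals exact pvHalveLt r h0 hm2

theorem pvA_eq_filter (r : Int) (jj n : Int) :
    update_set_py jj r n = (pvURaw jj r).filter (fun u => u < n) := by
  rw [update_set_py, pvURaw]
  by_cases h0 : r = 0
  · rw [dif_pos h0, dif_pos h0]; rfl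
  · rw [dif_neg h0, dif_neg h0]
    by_cases h2 : PySem.Int.mod r 2 ≠ 0
    · rw [dif_pos h2, dif_pos h2]; rfl
    · have hm2 := not_not.mp h2
      have hmm := PySem.Int.floordiv_mul_add_mod r 2
      rw [hm2] at hmm
      rw [dif_neg h2, dif_neg h2]
      dsimp only
      by_cases hj : jj < PySem.Int.floordiv r 2
      · rw [if_pos hj, if_pos hj]
        rw [pvA_eq_filter (PySem.Int.floordiv r 2) jj n]
        rw [List.filter_cons, List.filter_cons, List.filter_filter]
        simp only [Bool.and_self]
      · rw [if_neg hj, if_neg hj]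
        rw [pvA_eq_filter (PySem.Int.floordiv r 2) (jj - PySem.Int.floordiv r 2) n]
        by_cases hmneg : PySem.Int.floordiv r 2 < 0
        · rw [pvURaw_empty_of_neg (PySem.Int.floordiv r 2)
              (jj - PySem.Int.floordiv r 2) hmneg (by omega)]
          rfl
        · rw [List.filter_map, List.filter_map, List.filter_filter]
          refine congrArg (List.map _ ·) (List.filter_congr ?_)
          intro u _
          simp only [Function.comp]
          by_cases h : u + PySem.Int.floordiv r 2 < n
          · have h' : u < n := by omega
            rw [decide_eq_true h, decide_eq_true h']
            rfl
          · rw [decide_eq_false h, Bool.false_and]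
termination_by r.natAbs
decreasing_by all_goals exact pvHalveLt r h0 hm2

-- ===== VERDICT (by name: the statement is the Claim_ definition above) =====
theorem update_set_py_spec : Claim_equal_update_set_py := by
  intro j r n _ _
  unfold Spec_update_set_py update_set_py_alt
  rw [pvAltLoop_eq, pvA_eq_filter]
  simp
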